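-- pv_equiv track=rewrite | github.com/JoyHaddad/code-signal-questions | string-manipulation-ds/main.py | solution
-- ===== SOURCE A (Python) =====
-- def solution(s):
--     freq_dict = {}
--     output_dict = {}
--
--     for c in s:
--         if c in freq_dict:
--             freq_dict[c] += 1
--         else:
--             freq_dict[c] = 1
--
--     for char, freq in freq_dict.items():
--         replace = chr(((ord(char) - 100) % 26) + 97)
--         output_dict[char] = ord(replace) * freq
--
--     return(output_dict)
-- ===== SOURCE B (Python) =====
-- def solution(s):
--     output_dict = {}
--     for c in s:
--         output_dict[c] = output_dict.get(c, 0) + ((ord(c) - 100) % 26) + 97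
--     return output_dict
-- ===== Notes on version B (the rewrite author's own statement) =====
-- stated objective: simpler
-- what changed: Single pass over s accumulating the shifted code once per occurrence into output_dict, dropping A's frequency dictionary and its second loop entirely.
import Mathlib
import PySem

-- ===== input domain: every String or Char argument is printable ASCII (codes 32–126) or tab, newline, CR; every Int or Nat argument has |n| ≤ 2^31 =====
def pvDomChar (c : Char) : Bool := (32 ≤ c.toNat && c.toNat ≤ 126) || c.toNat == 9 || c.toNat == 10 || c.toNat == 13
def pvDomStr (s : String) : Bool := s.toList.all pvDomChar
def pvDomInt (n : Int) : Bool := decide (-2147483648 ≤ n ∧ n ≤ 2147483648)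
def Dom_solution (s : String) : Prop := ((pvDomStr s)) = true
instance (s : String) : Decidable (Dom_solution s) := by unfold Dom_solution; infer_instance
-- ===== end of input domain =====

-- B replaces A's two loops (count frequencies, then scale each code) by one accumulating pass; same O(n) cost, simpler.
-- Python dict keys are 1-char strings; both ports key the dict by Char and render keys via Char.toString on return.

-- ===== PORT A =====
-- A: build freq_dict by counting, then output_dict[char] = ord(chr(((ord(char)-100)%26)+97)) * freq
def solution (s : String) : List (String × Int) :=
  let freq_dict := s.toList.foldl
    (fun d c => if d.contains c then d.modify c 0 (· + 1) else d.insert c (1 : Int))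
    PySem.Dict.empty
  let output_dict := freq_dict.items.foldl
    (fun d p =>
      let replace := Char.ofNat ((PySem.Int.mod ((p.1.toNat : Int) - 100) 26 + 97).toNat)
      d.insert p.1 ((replace.toNat : Int) * p.2))
    PySem.Dict.empty
  output_dict.items.map (fun p => (p.1.toString, p.2))

-- ===== PORT B =====
-- B: one pass, output_dict[c] = output_dict.get(c, 0) + ((ord(c) - 100) % 26) + 97
def solution_alt (s : String) : List (String × Int) :=
  let output_dict := s.toList.foldl
    (fun d c => d.insert c (d.getD c 0 + (PySem.Int.mod ((c.toNat : Int) - 100) 26 + 97)))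
    (PySem.Dict.empty : PySem.Dict Char Int)
  output_dict.items.map (fun p => (p.1.toString, p.2))

-- ===== PRECONDITION & SPEC =====
def Spec_solution (s : String) (out : List (String × Int)) : Prop := out = solution_alt s
instance (s : String) (out : List (String × Int)) : Decidable (Spec_solution s out) := by unfold Spec_solution; infer_instance

-- ===== CLAIM (what is proved, stated in full; the proofs are below) =====
def Claim_equal_solution : Prop := ∀ (s : String), Dom_solution s → Spec_solution s (solution s)

-- ===== LEMMAS AND PROOFS =====

-- the per-character shifted code both programs use
def shiftCode (c : Char) : Int := PySem.Int.mod ((c.toNat : Int) - 100) 26 + 97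

-- A's chr/ord round trip: ord(chr(((ord(c)-100)%26)+97)) is just ((ord(c)-100)%26)+97
theorem ordChr_shiftCode (c : Char) :
    ((Char.ofNat ((PySem.Int.mod ((c.toNat : Int) - 100) 26 + 97).toNat)).toNat : Int)
      = shiftCode c := by
  have h0 : (0 : Int) ≤ PySem.Int.mod ((c.toNat : Int) - 100) 26 :=
    PySem.Int.mod_nonneg _ (by norm_num)
  have h26 : PySem.Int.mod ((c.toNat : Int) - 100) 26 < 26 :=
    PySem.Int.mod_lt _ (by norm_num)
  have hlt : (PySem.Int.mod ((c.toNat : Int) - 100) 26 + 97).toNat < 123 := by omega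
  have hv : (PySem.Int.mod ((c.toNat : Int) - 100) 26 + 97).toNat.isValidChar :=
    Or.inl (by omega)
  rw [Char.ofNat, dif_pos hv]
  show (((PySem.Int.mod ((c.toNat : Int) - 100) 26 + 97).toNat : Nat) : Int) = _
  unfold shiftCode
  omega

-- A's counting branch IS Counter's step when the key is absent
theorem modify_eq_insert_of_not_contains (d : PySem.Dict Char Int) (c : Char)
    (h : d.contains c = false) : d.modify c 0 (· + 1) = d.insert c 1 := by
  simp [PySem.Dict.modify, PySem.Dict.insert, h]
  rw [PySem.Dict.getD_of_not_contains (d := d) (k := c) (d0 := (0 : Int)) h]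

-- A's first loop is collections.Counter
theorem freq_eq_counter (l : List Char) :
    l.foldl (fun d c => if d.contains c then d.modify c 0 (· + 1) else d.insert c (1 : Int))
      PySem.Dict.empty = PySem.Dict.counter l := by
  rw [PySem.Dict.counter_eq_foldl]
  congr 1
  funext d c
  by_cases h : d.contains c = true
  · simp [h]
  · simp only [eq_false_of_ne_true h]
    exact (modify_eq_insert_of_not_contains d c (eq_false_of_ne_true h)).symm

-- B's loop invariant: each key accumulates shiftCode once per occurrence
theorem alt_getD (l : List Char) (d : PySem.Dict Char Int) (v : Char) :
    (l.foldl (fun d c => d.insert c (d.getD c 0 + shiftCode c)) d).getD v 0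
      = d.getD v 0 + shiftCode v * l.count v := by
  induction l generalizing d with
  | nil => simp
  | cons c t ih =>
    simp only [List.foldl_cons, ih, List.count_cons]
    by_cases hvc : v = c
    · subst hvc
      rw [PySem.Dict.getD_insert_self]
      simp
      ring
    · rw [PySem.Dict.getD_insert_of_ne _ _ _ hvc]
      simp [Ne.symm hvc]

theorem alt_items (l : List Char) :
    (l.foldl (fun d c => d.insert c (d.getD c 0 + shiftCode c))
        (PySem.Dict.empty : PySem.Dict Char Int)).items
      = (PySem.Set.ofList l).map (fun k => (k, shiftCode k * l.count k)) := by
  have hkeys : (l.foldl (fun d c => d.insert c (d.getD c 0 + shiftCode c))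
      (PySem.Dict.empty : PySem.Dict Char Int)).keys = PySem.Set.ofList l := by
    rw [PySem.Dict.keys_foldl_insert]
    simp [PySem.Set.update_nil_left]
  have hnd : (l.foldl (fun d c => d.insert c (d.getD c 0 + shiftCode c))
      (PySem.Dict.empty : PySem.Dict Char Int)).keys.Nodup := by
    rw [hkeys]; exact PySem.Set.nodup_ofList l
  rw [PySem.Dict.items_eq_map_keys _ hnd 0, hkeys]
  apply List.map_congr_left
  intro k _
  rw [alt_getD]
  simp

theorem sol_items (l : List Char) :
    ((PySem.Dict.counter l).items.foldl
      (fun d p => d.insert p.1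
        (((Char.ofNat ((PySem.Int.mod ((p.1.toNat : Int) - 100) 26 + 97).toNat)).toNat : Int) * p.2))
      (PySem.Dict.empty : PySem.Dict Char Int)).items
      = (PySem.Set.ofList l).map (fun k => (k, shiftCode k * l.count k)) := by
  have hfresh : ∀ p ∈ (PySem.Dict.counter l).items,
      (PySem.Dict.empty : PySem.Dict Char Int).contains p.1 = false := by
    intro p _; exact PySem.Dict.contains_empty p.1
  have hnd : ((PySem.Dict.counter l).items.map Prod.fst).Nodup := by
    have : (PySem.Dict.counter l).items.map Prod.fst = (PySem.Dict.counter l).keys := rfl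
    rw [this]; exact PySem.Dict.nodup_keys_counter l
  rw [PySem.Dict.items_foldl_insert_fresh (PySem.Dict.counter l).items Prod.fst
      (fun p : Char × Int =>
        ((Char.ofNat ((PySem.Int.mod ((p.1.toNat : Int) - 100) 26 + 97).toNat)).toNat : Int) * p.2)
      PySem.Dict.empty hfresh hnd]
  have hemp : (PySem.Dict.empty : PySem.Dict Char Int).items = [] := rfl
  rw [hemp, List.nil_append, PySem.Dict.items_counter, List.map_map]
  apply List.map_congr_left
  intro k _
  simp only [Function.comp_apply]
  rw [ordChr_shiftCode k]

-- ===== VERDICT (by name: the statement is the Claim_ definition above) =====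
theorem solution_spec : Claim_equal_solution := by
  intro s _
  show solution s = solution_alt s
  simp only [solution, solution_alt]
  have halt : (fun (d : PySem.Dict Char Int) (c : Char) =>
      d.insert c (d.getD c 0 + (PySem.Int.mod ((c.toNat : Int) - 100) 26 + 97)))
      = fun d c => d.insert c (d.getD c 0 + shiftCode c) := rfl
  rw [freq_eq_counter, sol_items, halt, alt_items]
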